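-- pv_equiv track=rewrite | github.com/Taoge123/OptimizedLeetcode | LeetcodeNew/python2/LC_1090.py | largestValsFromLabels
-- ===== SOURCE A (Python) =====
-- import collections
--
-- def largestValsFromLabels(values, labels, num_wanted: int, use_limit: int) -> int:
--     count = collections.Counter()
--     res = 0
--     for val, label in sorted(zip(values, labels))[::-1]:
--         if count[label] < use_limit:
--             res += val
--             count[label] += 1
--             num_wanted -= 1
--
--         if num_wanted == 0:
--             break
--
--     return res
-- ===== SOURCE B (Python) =====
-- def largestValsFromLabels(values, labels, num_wanted: int, use_limit: int) -> int:
--     # Bucket values by label, keep only each label's top use_limit values,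
--     # then take from the pooled survivors in descending order until the
--     # wanted counter runs out.
--     buckets = {}
--     for v, l in zip(values, labels):
--         buckets.setdefault(l, []).append(v)
--     pool = []
--     for vs in buckets.values():
--         vs.sort(reverse=True)
--         pool.extend(vs[:max(use_limit, 0)])
--     pool.sort(reverse=True)
--     res = 0
--     remaining = num_wanted
--     for v in pool:
--         res += v
--         remaining -= 1
--         if remaining == 0:
--             break
--     return res
-- ===== Notes on version B (the rewrite author's own statement) =====
-- stated objective: alternative
-- what changed: A does one global descending sort of (value,label) pairs and a single greedy scan with a per-label Counter and a break; B instead buckets values by label in a dict, keeps only each label's top use_limit values, pools the survivors, sorts the pool once and takes from it until the wanted counter runs out.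
import Mathlib
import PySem

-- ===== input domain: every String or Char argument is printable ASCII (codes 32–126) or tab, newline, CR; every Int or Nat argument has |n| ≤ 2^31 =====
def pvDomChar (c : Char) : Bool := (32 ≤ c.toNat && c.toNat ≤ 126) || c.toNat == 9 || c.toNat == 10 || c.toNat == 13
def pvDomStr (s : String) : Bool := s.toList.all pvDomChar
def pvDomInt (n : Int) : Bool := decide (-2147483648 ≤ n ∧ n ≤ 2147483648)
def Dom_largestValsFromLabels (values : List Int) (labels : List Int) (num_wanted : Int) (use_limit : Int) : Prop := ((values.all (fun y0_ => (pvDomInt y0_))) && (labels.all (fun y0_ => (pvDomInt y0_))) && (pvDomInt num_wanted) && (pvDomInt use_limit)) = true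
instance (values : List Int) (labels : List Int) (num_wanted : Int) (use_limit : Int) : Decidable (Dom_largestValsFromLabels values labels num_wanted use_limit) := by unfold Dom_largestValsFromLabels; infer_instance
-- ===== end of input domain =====

-- B replaces A's single global greedy scan by per-label bucketing (keep each label's top
-- use_limit values, pool them, take from the pool); same return value, alternative algorithm.

-- ===== PORT A =====
-- A's for-loop over sorted(zip(values, labels))[::-1]: the per-label Counter, the wanted
-- counter, and the 'break' when num_wanted hits 0.
def pvALoop (use_limit : Int) : List (Int × Int) → PySem.Dict Int Int → Int → Int → Int
  | [], _, res, _ => res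
  | (val, label) :: rest, count, res, num_wanted =>
    if count.getD label 0 < use_limit then
      -- res += val; count[label] += 1; num_wanted -= 1; then 'if num_wanted == 0: break'
      if num_wanted - 1 = 0 then res + val
      else pvALoop use_limit rest (count.modify label 0 (· + 1)) (res + val) (num_wanted - 1)
    else
      if num_wanted = 0 then res
      else pvALoop use_limit rest count res num_wanted

-- sorted(zip(values, labels)) compares the pairs lexicographically → PySem.List.sorted2;
-- [::-1] is List.reverse (exact: PySem.List.slice?_none_none_neg_one).
def largestValsFromLabels (values : List Int) (labels : List Int) (num_wanted : Int) (use_limit : Int) : Int :=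
  pvALoop use_limit (PySem.List.sorted2 (values.zip labels) Prod.fst Prod.snd).reverse
    PySem.Dict.empty 0 num_wanted

-- ===== PORT B =====
-- B's final loop: add pooled survivors in order until the 'remaining' counter hits 0.
def pvBLoop : List Int → Int → Int → Int
  | [], res, _ => res
  | v :: rest, res, remaining =>
    -- res += v; remaining -= 1; then 'if remaining == 0: break'
    if remaining - 1 = 0 then res + v
    else pvBLoop rest (res + v) (remaining - 1)

def largestValsFromLabels_alt (values : List Int) (labels : List Int) (num_wanted : Int) (use_limit : Int) : Int :=
  -- buckets: label → its values in encounter order (dict built with setdefault/append)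
  let buckets := (values.zip labels).foldl
    (fun d p => d.modify p.2 [] (fun vs => vs ++ [p.1])) PySem.Dict.empty
  -- per label: sort descending, keep vs[:max(use_limit, 0)], extend the pool
  let pool := buckets.values.foldl
    (fun acc vs => acc ++ PySem.List.slice (PySem.List.sorted vs (fun x => x) true)
      none (some (max use_limit 0))) []
  pvBLoop (PySem.List.sorted pool (fun x => x) true) 0 num_wanted

-- ===== PRECONDITION & SPEC =====
def Spec_largestValsFromLabels (values : List Int) (labels : List Int) (num_wanted : Int) (use_limit : Int) (out : Int) : Prop := out = largestValsFromLabels_alt values labels num_wanted use_limit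
instance (values : List Int) (labels : List Int) (num_wanted : Int) (use_limit : Int) (out : Int) : Decidable (Spec_largestValsFromLabels values labels num_wanted use_limit out) := by unfold Spec_largestValsFromLabels; infer_instance

-- ===== CLAIM (what is proved, stated in full; the proofs are below) =====
def Claim_equal_largestValsFromLabels : Prop := ∀ (values : List Int) (labels : List Int) (num_wanted : Int) (use_limit : Int), Dom_largestValsFromLabels values labels num_wanted use_limit → Spec_largestValsFromLabels values labels num_wanted use_limit (largestValsFromLabels values labels num_wanted use_limit)

-- ===== LEMMAS AND PROOFS =====

-- The comparison sorted2 uses for key pair (Prod.fst, Prod.snd) on Int × Int.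
def pvBef (a b : Int × Int) : Bool :=
  decide (a.1 < b.1) || (!decide (b.1 < a.1) && decide (a.2 < b.2))

theorem pvBef_trans (a b c : Int × Int) (h1 : pvBef a b = true) (h2 : pvBef b c = true) :
    pvBef a c = true := by
  simp only [pvBef, Bool.or_eq_true, Bool.and_eq_true, Bool.not_eq_eq_eq_not, Bool.not_true,
    decide_eq_true_eq, decide_eq_false_iff_not] at *
  omega

theorem pvBef_asymm (a b : Int × Int) (h : pvBef a b = true) : pvBef b a = false := by
  simp only [pvBef] at *
  simp only [Bool.or_eq_true, Bool.and_eq_true, Bool.not_eq_eq_eq_not, Bool.not_true,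
    decide_eq_true_eq, decide_eq_false_iff_not] at h
  simp only [Bool.or_eq_false_iff, Bool.and_eq_false_iff, Bool.not_eq_eq_eq_not, Bool.not_false,
    decide_eq_false_iff_not, decide_eq_true_eq]
  omega

theorem pvInsertBy_pairwise (x : Int × Int) (acc : List (Int × Int))
    (h : acc.Pairwise (fun a b => pvBef b a = false)) :
    (PySem.List.insertBy pvBef x acc).Pairwise (fun a b => pvBef b a = false) := by
  induction acc with
  | nil => simp [PySem.List.insertBy]
  | cons y ys ih =>
    rw [List.pairwise_cons] at h
    obtain ⟨hy, hys⟩ := h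
    cases hxy : pvBef x y with
    | true =>
      have he : PySem.List.insertBy pvBef x (y :: ys) = x :: y :: ys := by
        simp [PySem.List.insertBy, hxy]
      rw [he]
      refine List.Pairwise.cons ?_ (List.Pairwise.cons hy hys)
      intro z hz
      rcases List.mem_cons.mp hz with rfl | hz'
      · exact pvBef_asymm _ _ hxy
      · have hzy := hy z hz'
        by_contra hzx
        rw [Bool.not_eq_false] at hzx
        exact absurd (pvBef_trans z x y hzx hxy) (by simp [hzy])
    | false =>
      have he : PySem.List.insertBy pvBef x (y :: ys) = y :: PySem.List.insertBy pvBef x ys := by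
        simp [PySem.List.insertBy, hxy]
      rw [he]
      refine List.Pairwise.cons ?_ (ih hys)
      intro z hz
      rcases (PySem.List.mem_insertBy _ _ _ _).mp hz with rfl | hz'
      · exact hxy
      · exact hy z hz'

theorem pvFoldl_insertBy_pairwise (zs : List (Int × Int)) :
    ∀ acc, acc.Pairwise (fun a b => pvBef b a = false) →
    (zs.foldl (fun acc x => PySem.List.insertBy pvBef x acc) acc).Pairwise
      (fun a b => pvBef b a = false) := by
  induction zs with
  | nil => intro acc h; simpa using h
  | cons z t ih =>
    intro acc h
    exact ih _ (pvInsertBy_pairwise z acc h)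

theorem pvSorted2_pairwise (zs : List (Int × Int)) :
    (PySem.List.sorted2 zs Prod.fst Prod.snd).Pairwise (fun a b => pvBef b a = false) := by
  have he : PySem.List.sorted2 zs Prod.fst Prod.snd =
      zs.foldl (fun acc x => PySem.List.insertBy pvBef x acc) [] := rfl
  rw [he]
  exact pvFoldl_insertBy_pairwise zs [] List.Pairwise.nil

-- values of A's reversed sorted list are non-increasing
theorem pvSdesc_fst_pairwise (zs : List (Int × Int)) :
    ((PySem.List.sorted2 zs Prod.fst Prod.snd).reverse.map Prod.fst).Pairwise
      (fun a b : Int => b ≤ a) := by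
  rw [List.pairwise_map, List.pairwise_reverse]
  refine (pvSorted2_pairwise zs).imp ?_
  intro a b h
  simp only [pvBef, Bool.or_eq_false_iff, Bool.and_eq_false_iff, Bool.not_eq_eq_eq_not,
    Bool.not_false, decide_eq_false_iff_not, decide_eq_true_eq] at h
  omega

-- two non-increasing Int lists that are permutations of each other are equal
theorem pvDescEq (l1 l2 : List Int) (hp : l1.Perm l2)
    (h1 : l1.Pairwise (fun a b => b ≤ a)) (h2 : l2.Pairwise (fun a b => b ≤ a)) : l1 = l2 := by
  have hperm : l1.reverse.Perm l2.reverse :=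
    (l1.reverse_perm).trans (hp.trans (l2.reverse_perm).symm)
  have h1' : l1.reverse.Pairwise (fun a b : Int => a ≤ b) := List.pairwise_reverse.mpr h1
  have h2' : l2.reverse.Pairwise (fun a b : Int => a ≤ b) := List.pairwise_reverse.mpr h2
  have := PySem.List.eq_of_perm_of_pairwise_le_of_injective (l₁ := l1.reverse)
    (l₂ := l2.reverse) (fun x : Int => x) (fun a b hab => hab) hperm h1' h2'
  exact List.reverse_inj.mp this

-- the pairs A's loop picks (no break), as a function of the remaining Counter
def pvSurv (u : Int) : List (Int × Int) → PySem.Dict Int Int → List (Int × Int)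
  | [], _ => []
  | (v, l) :: rest, c =>
    if c.getD l 0 < u then (v, l) :: pvSurv u rest (c.modify l 0 (· + 1))
    else pvSurv u rest c

theorem pvSurv_sublist (u : Int) : ∀ (S : List (Int × Int)) (c : PySem.Dict Int Int),
    (pvSurv u S c).Sublist S := by
  intro S
  induction S with
  | nil => intro c; simp [pvSurv]
  | cons p rest ih =>
    intro c
    obtain ⟨v, l⟩ := p
    rw [pvSurv]
    split
    · exact (ih _).cons₂ _
    · exact (ih _).cons _

theorem pvSurv_nil_of_nonpos (u : Int) (hu : u ≤ 0) :
    ∀ (S : List (Int × Int)) (c : PySem.Dict Int Int), (∀ l, 0 ≤ c.getD l 0) →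
    pvSurv u S c = [] := by
  intro S
  induction S with
  | nil => intro c _; rfl
  | cons p rest ih =>
    intro c hc
    obtain ⟨v, l⟩ := p
    rw [pvSurv, if_neg (by have := hc l; omega)]
    exact ih c hc

theorem pvSurv_filter (u l : Int) : ∀ (S : List (Int × Int)) (c : PySem.Dict Int Int),
    (pvSurv u S c).filter (fun p => p.2 == l) =
      (S.filter (fun p => p.2 == l)).take (u - c.getD l 0).toNat := by
  intro S
  induction S with
  | nil => intro c; simp [pvSurv]
  | cons p rest ih =>
    intro c
    obtain ⟨v, l'⟩ := p
    by_cases hp : c.getD l' 0 < u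
    · by_cases hl : l' = l
      · subst hl
        rw [pvSurv, if_pos hp, List.filter_cons_of_pos (by simp),
          List.filter_cons_of_pos (by simp), ih, PySem.Dict.getD_modify_self]
        have ht : (u - c.getD l' 0).toNat = (u - (c.getD l' 0 + 1)).toNat + 1 := by omega
        rw [ht, List.take_succ_cons]
      · rw [pvSurv, if_pos hp, List.filter_cons_of_neg (by simp [hl]),
          List.filter_cons_of_neg (by simp [hl]), ih, PySem.Dict.getD_modify]
        rw [if_neg (fun h => hl h.symm)]
    · by_cases hl : l' = l
      · subst hl
        rw [pvSurv, if_neg hp, ih, List.filter_cons_of_pos (by simp)]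
        have ht : (u - c.getD l' 0).toNat = 0 := by omega
        rw [ht, List.take_zero, List.take_zero]
      · rw [pvSurv, if_neg hp, ih, List.filter_cons_of_neg (by simp [hl])]

theorem pvALoop_eq (u : Int) : ∀ (S : List (Int × Int)) (c : PySem.Dict Int Int)
    (res k : Int), k ≠ 0 →
    pvALoop u S c res k = pvBLoop ((pvSurv u S c).map Prod.fst) res k := by
  intro S
  induction S with
  | nil => intro c res k hk; simp [pvALoop, pvSurv, pvBLoop]
  | cons p rest ih =>
    intro c res k hk
    obtain ⟨v, l⟩ := p
    by_cases hp : c.getD l 0 < u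
    · rw [pvALoop, if_pos hp, pvSurv, if_pos hp, List.map_cons, pvBLoop]
      by_cases hk1 : k - 1 = 0
      · rw [if_pos hk1, if_pos hk1]
      · rw [if_neg hk1, if_neg hk1]
        exact ih _ _ _ hk1
    · rw [pvALoop, if_neg hp, if_neg hk, pvSurv, if_neg hp]
      exact ih _ _ _ hk

theorem pvALoop_eq_all (u : Int) (S : List (Int × Int)) (res k : Int) :
    pvALoop u S PySem.Dict.empty res k =
      pvBLoop ((pvSurv u S PySem.Dict.empty).map Prod.fst) res k := by
  by_cases hk : k = 0
  · subst hk
    cases S with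
    | nil => simp [pvALoop, pvSurv, pvBLoop]
    | cons p rest =>
      obtain ⟨v, l⟩ := p
      by_cases hu : (0 : Int) < u
      · have hp : (PySem.Dict.empty : PySem.Dict Int Int).getD l 0 < u := by
          rw [PySem.Dict.getD_empty]; exact hu
        rw [pvALoop, if_pos hp, pvSurv, if_pos hp, List.map_cons, pvBLoop,
          if_neg (by norm_num), if_neg (by norm_num)]
        exact pvALoop_eq u rest _ _ _ (by norm_num)
      · have hp : ¬ ((PySem.Dict.empty : PySem.Dict Int Int).getD l 0 < u) := by
          rw [PySem.Dict.getD_empty]; exact hu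
        have hs : pvSurv u ((v, l) :: rest) PySem.Dict.empty = [] :=
          pvSurv_nil_of_nonpos u (by omega) _ _
            (fun l' => by rw [PySem.Dict.getD_empty])
        rw [hs, pvALoop, if_neg hp, if_pos rfl, List.map_nil, pvBLoop]
  · exact pvALoop_eq u S _ res k hk

-- any pair list is a permutation of its per-label groups, for any nodup label cover
theorem pvGroup_perm : ∀ (K : List Int) (xs : List (Int × Int)), K.Nodup →
    (∀ p ∈ xs, p.2 ∈ K) →
    xs.Perm (K.flatMap (fun l => xs.filter (fun p => p.2 == l))) := by
  intro K
  induction K with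
  | nil =>
    intro xs _ hx
    cases xs with
    | nil => simp
    | cons p t => exact absurd (hx p List.mem_cons_self) (List.not_mem_nil)
  | cons l K' ih =>
    intro xs hK hx
    rw [List.nodup_cons] at hK
    obtain ⟨hlK, hK'⟩ := hK
    have h1 : ((xs.filter (fun p => p.2 == l)) ++
        (xs.filter (fun p => !(p.2 == l)))).Perm xs := List.filter_append_perm _ xs
    have hx' : ∀ p ∈ xs.filter (fun p => !(p.2 == l)), p.2 ∈ K' := by
      intro p hp
      rw [List.mem_filter] at hp
      rcases List.mem_cons.mp (hx p hp.1) with h | h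
      · exact absurd hp.2 (by simp [h])
      · exact h
    have h2 := ih (xs.filter (fun p => !(p.2 == l))) hK' hx'
    have h3 : ∀ l' ∈ K', (xs.filter (fun p => !(p.2 == l))).filter (fun p => p.2 == l') =
        xs.filter (fun p => p.2 == l') := by
      intro l' hl'
      have hne : l ≠ l' := fun h => hlK (h ▸ hl')
      rw [List.filter_filter]
      refine List.filter_congr ?_
      intro p _
      by_cases h : p.2 = l'
      · simp [h, Ne.symm hne]
      · simp [h]
    have h4 : (K'.flatMap (fun l' => (xs.filter (fun p => !(p.2 == l))).filter
        (fun p => p.2 == l'))) = K'.flatMap (fun l' => xs.filter (fun p => p.2 == l')) :=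
      List.flatMap_congr h3
    refine h1.symm.trans ?_
    rw [List.flatMap_cons, ← h4]
    exact List.Perm.append_left _ h2

-- per label: A's descending scan restricted to l lists exactly sorted(bucket l, reverse=True)
theorem pvLabelList_eq (zs : List (Int × Int)) (l : Int) :
    (((PySem.List.sorted2 zs Prod.fst Prod.snd).reverse.filter
        (fun p => p.2 == l)).map Prod.fst) =
      PySem.List.sorted ((zs.filter (fun p => p.2 == l)).map Prod.fst) (fun x => x) true := by
  refine pvDescEq _ _ ?_ ?_ ?_
  · have hS : (PySem.List.sorted2 zs Prod.fst Prod.snd).reverse.Perm zs :=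
      (List.reverse_perm _).trans (PySem.List.sorted2_perm zs Prod.fst Prod.snd false)
    have h1 := (hS.filter (fun p => p.2 == l)).map Prod.fst
    exact h1.trans (PySem.List.sorted_perm _ _ _).symm
  · refine List.Pairwise.sublist ?_ (pvSdesc_fst_pairwise zs)
    exact List.filter_sublist.map Prod.fst
  · simpa using PySem.List.sorted_pairwise_rev
      ((zs.filter (fun p => p.2 == l)).map Prod.fst) (fun x => x)

-- B's pool, characterised over the distinct labels
theorem pvPool_eq (zs : List (Int × Int)) (u : Int) :
    ((zs.foldl (fun d p => d.modify p.2 [] (fun vs => vs ++ [p.1]))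
        PySem.Dict.empty).values.foldl
      (fun acc vs => acc ++ PySem.List.slice (PySem.List.sorted vs (fun x => x) true)
        none (some (max u 0))) []) =
      (PySem.Set.ofList (zs.map Prod.snd)).flatMap
        (fun l => ((PySem.List.sorted ((zs.filter (fun p => p.2 == l)).map Prod.fst)
          (fun x => x) true)).take (max u 0).toNat) := by
  have hu0 : (0 : Int) ≤ max u 0 := le_max_right _ _
  rw [PySem.List.foldl_append_eq_flatMap, List.nil_append]
  have hkeys : (zs.foldl (fun d p => d.modify p.2 [] (fun vs => vs ++ [p.1]))
      PySem.Dict.empty).keys = PySem.Set.ofList (zs.map Prod.snd) := by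
    have h := PySem.Dict.keys_foldl_modify_key zs Prod.snd []
      (fun _ p => (fun vs => vs ++ [p.1])) PySem.Dict.empty
    simpa [PySem.Dict.keys_empty, PySem.Set.update, PySem.Set.ofList, PySem.Set.empty] using h
  have hnodup : (zs.foldl (fun d p => d.modify p.2 [] (fun vs => vs ++ [p.1]))
      PySem.Dict.empty).keys.Nodup := by
    rw [hkeys]; exact PySem.Set.nodup_ofList _
  rw [PySem.Dict.values_eq_map_keys _ hnodup [], hkeys, List.flatMap_map]
  refine List.flatMap_congr ?_
  intro l hl
  have hgetD : (zs.foldl (fun d p => d.modify p.2 [] (fun vs => vs ++ [p.1]))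
      PySem.Dict.empty).getD l [] = (zs.filter (fun p => p.2 == l)).map Prod.fst := by
    have hswap : (zs.foldl (fun d p => d.modify p.2 [] (fun vs => vs ++ [p.1]))
        PySem.Dict.empty) = ((zs.map Prod.swap).foldl
        (fun d q => d.modify q.1 [] (fun vs => vs ++ [q.2])) PySem.Dict.empty) := by
      rw [List.foldl_map]
      rfl
    rw [hswap, PySem.Dict.getD_foldl_modify_append, PySem.Dict.getD_empty, List.nil_append,
      List.filter_map, List.map_map]
    rfl
  rw [hgetD, PySem.List.slice_to _ hu0]

theorem pvSurvVals_eq_pool_sorted (zs : List (Int × Int)) (u : Int) :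
    (pvSurv u (PySem.List.sorted2 zs Prod.fst Prod.snd).reverse PySem.Dict.empty).map Prod.fst =
      PySem.List.sorted
        ((zs.foldl (fun d p => d.modify p.2 [] (fun vs => vs ++ [p.1]))
            PySem.Dict.empty).values.foldl
          (fun acc vs => acc ++ PySem.List.slice (PySem.List.sorted vs (fun x => x) true)
            none (some (max u 0))) []) (fun x => x) true := by
  rw [pvPool_eq]
  refine pvDescEq _ _ ?_ ?_ ?_
  · have hcover : ∀ p ∈ pvSurv u (PySem.List.sorted2 zs Prod.fst Prod.snd).reverse
        PySem.Dict.empty, p.2 ∈ PySem.Set.ofList (zs.map Prod.snd) := by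
      intro p hp
      have hmem : p ∈ zs := by
        have h1 := (pvSurv_sublist u _ PySem.Dict.empty).subset hp
        have h2 := List.mem_reverse.mp h1
        exact ((PySem.List.sorted2_perm zs Prod.fst Prod.snd false).subset h2)
      exact (PySem.Set.mem_ofList _ _).mpr (List.mem_map_of_mem hmem)
    have hg := pvGroup_perm (PySem.Set.ofList (zs.map Prod.snd)) _
      (PySem.Set.nodup_ofList _) hcover
    have hg' := hg.map Prod.fst
    rw [List.map_flatMap] at hg'
    have hinner : ∀ l ∈ PySem.Set.ofList (zs.map Prod.snd),
        ((pvSurv u (PySem.List.sorted2 zs Prod.fst Prod.snd).reverse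
          PySem.Dict.empty).filter (fun p => p.2 == l)).map Prod.fst =
        ((PySem.List.sorted ((zs.filter (fun p => p.2 == l)).map Prod.fst)
          (fun x => x) true)).take (max u 0).toNat := by
      intro l _
      rw [pvSurv_filter, PySem.Dict.getD_empty, List.map_take, pvLabelList_eq]
      have ht : (u - 0).toNat = (max u 0).toNat := by omega
      rw [ht]
    rw [List.flatMap_congr hinner] at hg'
    exact hg'.trans (PySem.List.sorted_perm _ _ _).symm
  · refine List.Pairwise.sublist ?_ (pvSdesc_fst_pairwise zs)
    exact (pvSurv_sublist u _ _).map Prod.fst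
  · simpa using PySem.List.sorted_pairwise_rev _ (fun x : Int => x)

-- ===== VERDICT (by name: the statement is the Claim_ definition above) =====
theorem largestValsFromLabels_spec : Claim_equal_largestValsFromLabels := by
  intro values labels num_wanted use_limit _
  unfold Spec_largestValsFromLabels largestValsFromLabels largestValsFromLabels_alt
  rw [pvALoop_eq_all, pvSurvVals_eq_pool_sorted]
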